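-- pv_equiv track=rewrite | github.com/GowthamSagar310/CompetitiveProgramming | CodeforcesProblems/cf_165A.py | has_left_right
-- ===== SOURCE A (Python) =====
-- def has_left_right(point, points):
--     has_left = False
--     has_right = False
--     for i in range(len(points)):
--         x1, y1 = points[i]
--         if point[1] == y1:
--             if point[0] < x1:
--                 has_right = True
--             if point[0] > x1:
--                 has_left = True
--     return has_left and has_right
-- ===== SOURCE B (Python) =====
-- def has_left_right(point, points):
--     xs = [x for x, y in points if y == point[1]]
--     if not xs:
--         return False
--     return min(xs) < point[0] and max(xs) > point[0]
-- ===== Notes on version B (the rewrite author's own statement) =====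
-- stated objective: simpler
-- what changed: Instead of an index loop maintaining two boolean flags, B filters the same-row x-coordinates once and compares their min and max against the point's x.
import Mathlib
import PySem

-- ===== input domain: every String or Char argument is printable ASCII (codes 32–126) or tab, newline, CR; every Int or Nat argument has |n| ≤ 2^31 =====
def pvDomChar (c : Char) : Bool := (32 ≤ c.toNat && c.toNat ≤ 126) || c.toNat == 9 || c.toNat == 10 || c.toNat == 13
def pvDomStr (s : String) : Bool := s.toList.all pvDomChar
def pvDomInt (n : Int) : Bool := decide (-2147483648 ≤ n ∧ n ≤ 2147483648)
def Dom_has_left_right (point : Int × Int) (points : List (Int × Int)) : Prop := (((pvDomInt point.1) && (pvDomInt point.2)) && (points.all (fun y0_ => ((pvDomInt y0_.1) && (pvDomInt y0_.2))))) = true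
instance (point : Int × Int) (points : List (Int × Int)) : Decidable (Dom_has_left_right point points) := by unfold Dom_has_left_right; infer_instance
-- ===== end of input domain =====

-- B replaces A's index loop with two boolean flags by filter-the-row then min/max extremes (objective: simpler).

-- ===== PORT A =====
def has_left_right (point : Int × Int) (points : List (Int × Int)) : Bool :=
  -- for i in range(len(points)): flags (has_left, has_right) as the fold state
  let st := (PySem.List.pyRange 0 (points.length : Int) 1).foldl
    (fun (st : Bool × Bool) i =>
      let p := PySem.List.pyGetD points i (0, 0)
      if point.2 = p.2 then
        let st1 := if point.1 < p.1 then (st.1, true) else st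
        if point.1 > p.1 then (true, st1.2) else st1
      else st) (false, false)
  st.1 && st.2

-- ===== PORT B =====
def has_left_right_alt (point : Int × Int) (points : List (Int × Int)) : Bool :=
  let xs := (points.filter (fun p => p.2 == point.2)).map Prod.fst
  match PySem.List.min? xs (fun x => x), PySem.List.max? xs (fun x => x) with
  | some mn, some mx => decide (mn < point.1) && decide (mx > point.1)
  | _, _ => false

-- ===== PRECONDITION & SPEC =====
def Spec_has_left_right (point : Int × Int) (points : List (Int × Int)) (out : Bool) : Prop := out = has_left_right_alt point points
instance (point : Int × Int) (points : List (Int × Int)) (out : Bool) : Decidable (Spec_has_left_right point points out) := by unfold Spec_has_left_right; infer_instance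

-- ===== CLAIM (what is proved, stated in full; the proofs are below) =====
def Claim_equal_has_left_right : Prop := ∀ (point : Int × Int) (points : List (Int × Int)), Dom_has_left_right point points → Spec_has_left_right point points (has_left_right point points)

-- ===== LEMMAS AND PROOFS =====

-- A's loop body as a named step function
def pvStep (point : Int × Int) (st : Bool × Bool) (p : Int × Int) : Bool × Bool :=
  if point.2 = p.2 then
    let st1 := if point.1 < p.1 then (st.1, true) else st
    if point.1 > p.1 then (true, st1.2) else st1
  else st

theorem pvStep_char (point : Int × Int) (st : Bool × Bool) (p : Int × Int) :
    pvStep point st p =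
      (st.1 || (decide (p.2 = point.2) && decide (p.1 < point.1)),
       st.2 || (decide (p.2 = point.2) && decide (point.1 < p.1))) := by
  unfold pvStep
  by_cases h : point.2 = p.2
  · simp only [h, if_true]
    split_ifs with h1 h2 <;> simp_all
    all_goals first
      | omega
      | (have hx : p.1 = point.1 := by omega
         simp [hx])
  · have h' : ¬ p.2 = point.2 := fun hpe => h hpe.symm
    simp [h, h']

theorem pvFold_char (point : Int × Int) (xs : List (Int × Int)) (st : Bool × Bool) :
    xs.foldl (pvStep point) st =
      (st.1 || xs.any (fun p => decide (p.2 = point.2) && decide (p.1 < point.1)),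
       st.2 || xs.any (fun p => decide (p.2 = point.2) && decide (point.1 < p.1))) := by
  induction xs generalizing st with
  | nil => simp
  | cons p t ih => simp [List.foldl_cons, ih, pvStep_char, Bool.or_assoc]

-- any (· < c) over a list of ints, characterised by its minimum (and dually the maximum)
theorem any_lt_iff_min? (l : List Int) (c : Int) :
    l.any (fun v => decide (v < c)) =
      (match PySem.List.min? l (fun x => x) with
       | some m => decide (m < c)
       | none => false) := by
  cases h : PySem.List.min? l (fun x => x) with
  | none =>
    rw [PySem.List.min?_eq_none_iff] at h
    simp [h]
  | some m =>
    have hmem := PySem.List.min?_mem h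
    have hmin := PySem.List.min?_isMin h
    by_cases hc : m < c
    · simp [hc]; exact ⟨m, hmem, hc⟩
    · simp [hc]; intro x hx; have := hmin x hx; omega

theorem any_gt_iff_max? (l : List Int) (c : Int) :
    l.any (fun v => decide (c < v)) =
      (match PySem.List.max? l (fun x => x) with
       | some m => decide (c < m)
       | none => false) := by
  cases h : PySem.List.max? l (fun x => x) with
  | none =>
    rw [PySem.List.max?_eq_none_iff] at h
    simp [h]
  | some m =>
    have hmem := PySem.List.max?_mem h
    have hmax := PySem.List.max?_isMax h
    by_cases hc : c < m
    · simp [hc]; exact ⟨m, hmem, hc⟩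
    · simp [hc]; intro x hx; have := hmax x hx; omega

-- ===== VERDICT (by name: the statement is the Claim_ definition above) =====
theorem has_left_right_spec : Claim_equal_has_left_right := by
  intro point points _
  unfold Spec_has_left_right has_left_right has_left_right_alt
  rw [show (fun (st : Bool × Bool) i =>
        let p := PySem.List.pyGetD points i (0, 0)
        if point.2 = p.2 then
          let st1 := if point.1 < p.1 then (st.1, true) else st
          if point.1 > p.1 then (true, st1.2) else st1
        else st)
      = (fun (st : Bool × Bool) i => pvStep point st (PySem.List.pyGetD points i (0, 0))) from rfl]
  rw [PySem.List.foldl_pyRange_zero_pyGetD']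
  rw [pvFold_char]
  simp only [Bool.false_or]
  have hL : points.any (fun p => decide (p.2 = point.2) && decide (p.1 < point.1))
      = ((points.filter (fun p => p.2 == point.2)).map Prod.fst).any (fun v => decide (v < point.1)) := by
    simp only [List.any_map, List.any_filter, Function.comp]
    apply List.any_congr rfl
    intro p
    by_cases h : p.2 = point.2 <;> simp [h]
  have hR : points.any (fun p => decide (p.2 = point.2) && decide (point.1 < p.1))
      = ((points.filter (fun p => p.2 == point.2)).map Prod.fst).any (fun v => decide (point.1 < v)) := by
    simp only [List.any_map, List.any_filter, Function.comp]
    apply List.any_congr rfl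
    intro p
    by_cases h : p.2 = point.2 <;> simp [h]
  rw [hL, hR, any_lt_iff_min?, any_gt_iff_max?]
  cases hmn : PySem.List.min? ((points.filter (fun p => p.2 == point.2)).map Prod.fst) (fun x => x) with
  | none =>
    have hmx : PySem.List.max? ((points.filter (fun p => p.2 == point.2)).map Prod.fst) (fun x => x) = none := by
      rw [PySem.List.max?_eq_none_iff]
      rwa [PySem.List.min?_eq_none_iff] at hmn
    simp [hmx]
  | some mn =>
    cases hmx : PySem.List.max? ((points.filter (fun p => p.2 == point.2)).map Prod.fst) (fun x => x) with
    | none =>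
      rw [PySem.List.max?_eq_none_iff] at hmx
      rw [hmx] at hmn
      simp [PySem.List.min?] at hmn
    | some mx => simp
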